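-- pv_equiv track=rewrite | github.com/aditya2kx/jarvis | skills/slack/questionnaire.py | _group_by_category
-- ===== SOURCE A (Python) =====
-- BATCH_MERGE = [
--     {
--         "label": "Jobs & Employment",
--         "categories": ["Jobs & Employment"],
--     },
--     {
--         "label": "Investments & Brokerage",
--         "categories": ["Investments & Brokerage"],
--     },
--     {
--         "label": "Rental Properties",
--         "categories": ["Rental Properties"],
--     },
--     {
--         "label": "Partnerships & Business",
--         "categories": ["Partnerships & Investments", "Your Business"],
--     },
--     {
--         "label": "Charitable, Health & Home",
--         "categories": ["Charitable Giving", "Health & Insurance", "Your Home"],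
--     },
--     {
--         "label": "Life Events & Investments",
--         "categories": ["Major Life Events", "Investments & Stock"],
--     },
--     {
--         "label": "Retirement, Insurance, Education & Taxes",
--         "categories": ["Retirement & Savings", "Insurance & Health",
--                         "Education & Student Loans", "Taxes & Payments"],
--     },
-- ]
--
-- def _group_by_category(questions):
--     """Group questions into 7 merged batches for a natural Slack conversation."""
--     by_cat = {}
--     for q in questions:
--         cat = q["category"]
--         if cat not in by_cat:
--             by_cat[cat] = []
--         by_cat[cat].append(q)
--
--     batches = []
--     used = set()
--     for batch_def in BATCH_MERGE:
--         merged_qs = []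
--         for cat in batch_def["categories"]:
--             merged_qs.extend(by_cat.get(cat, []))
--             used.add(cat)
--         if merged_qs:
--             batches.append((batch_def["label"], merged_qs))
--
--     for cat, qs in by_cat.items():
--         if cat not in used:
--             batches.append((cat, qs))
--
--     return batches
-- ===== SOURCE B (Python) =====
-- BATCH_MERGE = [
--     {
--         "label": "Jobs & Employment",
--         "categories": ["Jobs & Employment"],
--     },
--     {
--         "label": "Investments & Brokerage",
--         "categories": ["Investments & Brokerage"],
--     },
--     {
--         "label": "Rental Properties",
--         "categories": ["Rental Properties"],
--     },
--     {
--         "label": "Partnerships & Business",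
--         "categories": ["Partnerships & Investments", "Your Business"],
--     },
--     {
--         "label": "Charitable, Health & Home",
--         "categories": ["Charitable Giving", "Health & Insurance", "Your Home"],
--     },
--     {
--         "label": "Life Events & Investments",
--         "categories": ["Major Life Events", "Investments & Stock"],
--     },
--     {
--         "label": "Retirement, Insurance, Education & Taxes",
--         "categories": ["Retirement & Savings", "Insurance & Health",
--                         "Education & Student Loans", "Taxes & Payments"],
--     },
-- ]
--
--
-- def _group_by_category(questions):
--     """Group questions into merged category batches by direct filter passes (no dict index)."""
--     known = [c for b in BATCH_MERGE for c in b["categories"]]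
--     batches = []
--     for b in BATCH_MERGE:
--         qs = [q for c in b["categories"] for q in questions if q["category"] == c]
--         if qs:
--             batches.append((b["label"], qs))
--     leftover = []
--     for q in questions:
--         c = q["category"]
--         if c not in known and c not in leftover:
--             leftover.append(c)
--     for c in leftover:
--         batches.append((c, [q for q in questions if q["category"] == c]))
--     return batches
-- ===== Notes on version B (the rewrite author's own statement) =====
-- stated objective: alternative
-- what changed: B drops A's dict-bucketing pass entirely: each merged batch is built by filtering the question list per category, and leftover categories are collected by a first-appearance scan and each filled by its own filter pass.
import Mathlib
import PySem

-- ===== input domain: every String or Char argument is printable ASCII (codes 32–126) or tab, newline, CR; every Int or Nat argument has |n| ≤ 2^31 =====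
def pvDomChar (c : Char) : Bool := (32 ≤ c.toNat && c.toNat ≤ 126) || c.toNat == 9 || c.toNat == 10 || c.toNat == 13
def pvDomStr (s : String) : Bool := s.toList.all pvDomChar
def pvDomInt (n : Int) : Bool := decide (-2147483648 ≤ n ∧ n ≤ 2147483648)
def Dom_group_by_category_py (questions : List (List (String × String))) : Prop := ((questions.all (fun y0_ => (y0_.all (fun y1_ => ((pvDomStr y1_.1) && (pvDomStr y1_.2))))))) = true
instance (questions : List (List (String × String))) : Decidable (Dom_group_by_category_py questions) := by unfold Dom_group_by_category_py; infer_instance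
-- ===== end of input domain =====

-- B replaces A's dict-bucketing pass by per-category filter passes over the question list
-- (a different decomposition, not faster); return values agree on every input where A returns.

-- the module constant BATCH_MERGE: (label, categories) pairs
def pvBatchMerge : List (String × List String) :=
  [ ("Jobs & Employment", ["Jobs & Employment"]),
    ("Investments & Brokerage", ["Investments & Brokerage"]),
    ("Rental Properties", ["Rental Properties"]),
    ("Partnerships & Business", ["Partnerships & Investments", "Your Business"]),
    ("Charitable, Health & Home", ["Charitable Giving", "Health & Insurance", "Your Home"]),
    ("Life Events & Investments", ["Major Life Events", "Investments & Stock"]),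
    ("Retirement, Insurance, Education & Taxes",
      ["Retirement & Savings", "Insurance & Health", "Education & Student Loans", "Taxes & Payments"]) ]

-- q["category"]; a missing "category" key (Python KeyError) is excluded by Pre_, so the
-- default "" is never reached on admitted inputs
def pvCatOf (q : List (String × String)) : String :=
  ((PySem.Dict.mk q).get? "category").getD ""

-- ===== PORT A =====
-- the by_cat bucketing loop
def pvByCat (questions : List (List (String × String))) :
    PySem.Dict String (List (List (String × String))) :=
  questions.foldl (fun d q =>
      let cat := pvCatOf q
      let d := if d.contains cat then d else d.insert cat []
      d.modify cat [] (fun l => l ++ [q]))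
    PySem.Dict.empty

-- the BATCH_MERGE loop: returns (batches, used)
def pvBatchLoopA (by_cat : PySem.Dict String (List (List (String × String)))) :
    List (String × List (List (String × String))) × PySem.Set String :=
  pvBatchMerge.foldl (fun st bd =>
      let inner := bd.2.foldl (fun p c => (p.1 ++ by_cat.getD c [], p.2.add c))
        (([] : List (List (String × String))), st.2)
      (if inner.1 ≠ [] then st.1 ++ [(bd.1, inner.1)] else st.1, inner.2))
    ([], PySem.Set.empty)

def group_by_category_py (questions : List (List (String × String))) : List (String × (List (List (String × String)))) :=
  (pvByCat questions).items.foldl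
    (fun bs kv => if ¬ (PySem.Set.contains (pvBatchLoopA (pvByCat questions)).2 kv.1 = true) then bs ++ [kv] else bs)
    (pvBatchLoopA (pvByCat questions)).1

-- ===== PORT B =====
def pvKnown : List String := pvBatchMerge.flatMap (fun bd => bd.2)

def pvBatchesB (questions : List (List (String × String))) :
    List (String × List (List (String × String))) :=
  pvBatchMerge.foldl (fun bs bd =>
      let qs := bd.2.flatMap (fun c => questions.filter (fun q => pvCatOf q == c))
      if qs ≠ [] then bs ++ [(bd.1, qs)] else bs) []

def pvLeftoverB (questions : List (List (String × String))) : List String :=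
  questions.foldl (fun seen q =>
      let c := pvCatOf q
      if (!pvKnown.contains c && !seen.contains c) then seen ++ [c] else seen) []

def group_by_category_py_alt (questions : List (List (String × String))) : List (String × (List (List (String × String)))) :=
  (pvLeftoverB questions).foldl
    (fun bs c => bs ++ [(c, questions.filter (fun q => pvCatOf q == c))])
    (pvBatchesB questions)

-- ===== PRECONDITION & SPEC =====
-- Pre_ excludes exactly the questions without a "category" key, on which the Python A raises KeyError.
def Pre_group_by_category_py (questions : List (List (String × String))) : Prop :=
  ∀ q ∈ questions, (PySem.Dict.mk q).contains "category" = true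
instance (questions : List (List (String × String))) : Decidable (Pre_group_by_category_py questions) := by unfold Pre_group_by_category_py; infer_instance

def pvWitness_group_by_category_py : (List (List (String × String))) :=
  [[("category", "Your Home"), ("text", "Any renovations?")],
   [("category", "Pets"), ("text", "Any pets?")]]

def Spec_group_by_category_py (questions : List (List (String × String))) (out : List (String × (List (List (String × String))))) : Prop := out = group_by_category_py_alt questions
instance (questions : List (List (String × String))) (out : List (String × (List (List (String × String))))) : Decidable (Spec_group_by_category_py questions out) := by unfold Spec_group_by_category_py; infer_instance

-- ===== CLAIM (what is proved, stated in full; the proofs are below) =====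
def Claim_equal_group_by_category_py : Prop := ∀ (questions : List (List (String × String))), Dom_group_by_category_py questions → Pre_group_by_category_py questions → Spec_group_by_category_py questions (group_by_category_py questions)

-- ===== LEMMAS AND PROOFS =====

-- A's "if cat not in by_cat: by_cat[cat] = []; by_cat[cat].append(q)" is one modify
theorem pv_bucket_body (d : PySem.Dict String (List (List (String × String))))
    (k : String) (q : List (String × String)) :
    ((if d.contains k then d else d.insert k []).modify k [] (fun l => l ++ [q]))
      = d.modify k [] (fun l => l ++ [q]) := by
  by_cases h : d.contains k = true
  · rw [if_pos h]
  · rw [if_neg h]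
    simp only [PySem.Dict.modify, PySem.Dict.getD_insert_self, PySem.Dict.insert_insert_self]
    rw [PySem.Dict.getD_of_not_contains d _ (by simpa using h)]

theorem pvByCat_eq (questions : List (List (String × String))) :
    pvByCat questions
      = questions.foldl (fun d q => d.modify (pvCatOf q) [] (fun l => l ++ [q]))
          PySem.Dict.empty := by
  unfold pvByCat
  exact PySem.List.foldl_congr_mem _ _ _ _ (fun d q _ => pv_bucket_body d (pvCatOf q) q)

theorem pvByCat_getD (questions : List (List (String × String))) (c : String) :
    (pvByCat questions).getD c [] = questions.filter (fun q => pvCatOf q == c) := by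
  rw [pvByCat_eq]
  have h : questions.foldl (fun d q => d.modify (pvCatOf q) [] (fun l => l ++ [q]))
        PySem.Dict.empty
      = (questions.map (fun q => (pvCatOf q, q))).foldl
          (fun d p => d.modify p.1 [] (fun l => l ++ [p.2])) PySem.Dict.empty := by
    rw [List.foldl_map]
  rw [h, PySem.Dict.getD_foldl_modify_append]
  simp [List.filter_map, Function.comp_def]

theorem pvByCat_keys (questions : List (List (String × String))) :
    (pvByCat questions).keys = PySem.Set.ofList (questions.map pvCatOf) := by
  rw [pvByCat_eq, PySem.Dict.keys_foldl_modify_key, PySem.Dict.keys_empty,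
    PySem.Set.update_nil_left]

theorem pvByCat_items (questions : List (List (String × String))) :
    (pvByCat questions).items
      = (PySem.Set.ofList (questions.map pvCatOf)).map
          (fun c => (c, questions.filter (fun q => pvCatOf q == c))) := by
  have hnd : (pvByCat questions).keys.Nodup := by
    rw [pvByCat_eq]
    exact PySem.Dict.nodup_keys_foldl_modify_key _ _ _ _ _ PySem.Dict.nodup_keys_empty
  rw [PySem.Dict.items_eq_map_keys _ hnd [], pvByCat_keys]
  simp only [pvByCat_getD]

-- A's batch loop, with its two state components separated
theorem pv_loopA_eq (d : PySem.Dict String (List (List (String × String))))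
    (l : List (String × List String))
    (st : List (String × List (List (String × String))) × PySem.Set String) :
    l.foldl (fun st bd =>
      let inner := bd.2.foldl (fun p c => (p.1 ++ d.getD c [], p.2.add c))
        (([] : List (List (String × String))), st.2)
      (if inner.1 ≠ [] then st.1 ++ [(bd.1, inner.1)] else st.1, inner.2)) st
    = (l.foldl (fun bs bd =>
         let qs := bd.2.foldl (fun a c => a ++ d.getD c []) []
         if qs ≠ [] then bs ++ [(bd.1, qs)] else bs) st.1,
       l.foldl (fun u bd => bd.2.foldl (fun s c => s.add c) u) st.2) := by
  induction l generalizing st with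
  | nil => simp
  | cons a l ih =>
    simp only [List.foldl_cons]
    rw [show (a.2.foldl (fun p c => (p.1 ++ d.getD c [], p.2.add c))
        (([] : List (List (String × String))), st.2))
      = (a.2.foldl (fun x c => x ++ d.getD c []) [], a.2.foldl (fun s c => s.add c) st.2)
      from PySem.List.foldl_prod_mk (fun x c => x ++ d.getD c []) (fun s c => s.add c) a.2 [] st.2]
    rw [ih]

-- the used-set component of A's batch loop is the constant set of all merged categories
theorem pvBatchLoopA_snd (d : PySem.Dict String (List (List (String × String)))) :
    (pvBatchLoopA d).2 = pvKnown := by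
  unfold pvBatchLoopA
  rw [pv_loopA_eq]
  dsimp only
  decide

-- the batches component equals B's batch loop
theorem pvBatchLoopA_fst (questions : List (List (String × String))) :
    (pvBatchLoopA (pvByCat questions)).1 = pvBatchesB questions := by
  unfold pvBatchLoopA pvBatchesB
  rw [pv_loopA_eq]
  refine PySem.List.foldl_congr_mem _ _ _ _ ?_
  intro acc bd _
  simp only [pvByCat_getD, PySem.List.foldl_append_eq_flatMap, List.nil_append]

-- B's leftover scan is the known-filtered first-appearance dedup of the categories
theorem pv_left_fold (cs : List String) (seen : List String) :
    cs.foldl (fun s c => if (!pvKnown.contains c && !List.contains s c) then s ++ [c] else s) seen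
      = PySem.Set.update seen (cs.filter (fun c => !pvKnown.contains c)) := by
  induction cs generalizing seen with
  | nil => rw [List.foldl_nil, List.filter_nil, PySem.Set.update_nil]
  | cons c cs ih =>
    rw [List.foldl_cons, List.filter_cons]
    by_cases hk : pvKnown.contains c = true
    · have h1 : (!pvKnown.contains c) = false := by rw [hk]; rfl
      simp only [h1, Bool.false_and, Bool.false_eq_true, if_false]
      exact ih seen
    · have h1 : (!pvKnown.contains c) = true := by
        rw [eq_false_of_ne_true hk]; rfl
      simp only [h1, Bool.true_and, if_true]
      have h2 : (if (!List.contains seen c) = true then seen ++ [c] else seen)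
          = PySem.Set.add seen c := by
        rw [PySem.Set.add_eq_ite]
        by_cases hm : c ∈ seen <;> simp [hm]
      rw [h2, PySem.Set.update_cons]
      exact ih (PySem.Set.add seen c)

theorem pv_ofList_filter {α : Type} [BEq α] [LawfulBEq α] (p : α → Bool) (xs : List α) :
    PySem.Set.ofList (xs.filter p) = (PySem.Set.ofList xs).filter p := by
  induction xs using List.reverseRecOn with
  | nil => rfl
  | append_singleton xs x ih =>
    rw [List.filter_append, PySem.Set.ofList_append_singleton]
    by_cases hp : p x = true
    · have h2 : List.filter p [x] = [x] := by simp [hp]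
      rw [h2, PySem.Set.ofList_append_singleton, ih,
        PySem.Set.add_eq_ite, PySem.Set.add_eq_ite]
      have hmem : x ∈ List.filter p (PySem.Set.ofList xs) ↔ x ∈ PySem.Set.ofList xs := by
        simp [List.mem_filter, hp]
      by_cases hm : x ∈ PySem.Set.ofList xs
      · rw [if_pos hm, if_pos (hmem.mpr hm)]
      · rw [if_neg hm, if_neg (fun h => hm (hmem.mp h)), List.filter_append, h2]
    · have h2 : List.filter p [x] = [] := by simp [hp]
      rw [h2, List.append_nil, ih, PySem.Set.add_eq_ite]
      by_cases hm : x ∈ PySem.Set.ofList xs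
      · rw [if_pos hm]
      · rw [if_neg hm, List.filter_append, h2, List.append_nil]

theorem pvLeftoverB_eq (questions : List (List (String × String))) :
    pvLeftoverB questions
      = (PySem.Set.ofList (questions.map pvCatOf)).filter (fun c => !pvKnown.contains c) := by
  unfold pvLeftoverB
  have h : questions.foldl
        (fun seen q =>
          if (!pvKnown.contains (pvCatOf q) && !List.contains seen (pvCatOf q))
          then seen ++ [pvCatOf q] else seen) ([] : List String)
      = (questions.map pvCatOf).foldl
          (fun s c => if (!pvKnown.contains c && !s.contains c) then s ++ [c] else s) [] := by
    rw [List.foldl_map]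
  rw [h, pv_left_fold, PySem.Set.update_nil_left, pv_ofList_filter]

-- ===== VERDICT (by name: the statement is the Claim_ definition above) =====
theorem group_by_category_py_spec : Claim_equal_group_by_category_py := by
  intro questions _ _
  unfold Spec_group_by_category_py group_by_category_py group_by_category_py_alt
  rw [pvByCat_items, pvBatchLoopA_snd, pvBatchLoopA_fst,
    PySem.List.foldl_append_ite_eq_filter, List.filter_map,
    PySem.List.foldl_append_singleton_eq_map, pvLeftoverB_eq]
  simp [Function.comp_def]
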